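-- pv_equiv track=rewrite | github.com/Ravi-Chudgar/cv-tailor-app | server/app/keyword_search.py | _get_action_verbs_for_role
-- ===== SOURCE A (Python) =====
-- from typing import List, Dict, Set
--
-- def _get_action_verbs_for_role(job_title: str) -> List[str]:
--     """Return role-appropriate action verbs for CV bullet points"""
--     title_lower = job_title.lower()
--
--     common_verbs = [
--         'Developed', 'Designed', 'Implemented', 'Optimized', 'Delivered',
--         'Collaborated', 'Built', 'Led', 'Architected', 'Automated',
--     ]
--
--     if any(w in title_lower for w in ['frontend', 'front-end', 'ui', 'react']):
--         return common_verbs + [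
--             'Converted', 'Styled', 'Rendered', 'Integrated', 'Refactored',
--             'Tested', 'Improved', 'Enhanced', 'Modernized', 'Migrated',
--         ]
--     elif any(w in title_lower for w in ['backend', 'back-end', 'server', 'api']):
--         return common_verbs + [
--             'Deployed', 'Scaled', 'Containerised', 'Secured', 'Monitored',
--             'Provisioned', 'Configured', 'Maintained', 'Troubleshot', 'Resolved',
--         ]
--     elif any(w in title_lower for w in ['full stack', 'fullstack']):
--         return common_verbs + [
--             'Engineered', 'Deployed', 'Integrated', 'Tested', 'Debugged',
--             'Refactored', 'Maintained', 'Scaled', 'Secured', 'Mentored',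
--         ]
--     elif any(w in title_lower for w in ['devops', 'sre', 'infrastructure']):
--         return common_verbs + [
--             'Provisioned', 'Containerised', 'Orchestrated', 'Monitored',
--             'Automated', 'Configured', 'Secured', 'Scaled', 'Troubleshot',
--         ]
--     elif any(w in title_lower for w in ['data', 'ml', 'machine learning', 'analyst']):
--         return common_verbs + [
--             'Analyzed', 'Modeled', 'Trained', 'Evaluated', 'Visualized',
--             'Extracted', 'Transformed', 'Predicted', 'Clustered', 'Classified',
--         ]
--     else:
--         return common_verbs + [
--             'Engineered', 'Maintained', 'Tested', 'Deployed', 'Integrated',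
--             'Resolved', 'Refactored', 'Scaled', 'Documented', 'Mentored',
--         ]
-- ===== SOURCE B (Python) =====
-- from typing import List
--
-- _COMMON_VERBS = [
--     'Developed', 'Designed', 'Implemented', 'Optimized', 'Delivered',
--     'Collaborated', 'Built', 'Led', 'Architected', 'Automated',
-- ]
--
-- # One flat keyword -> category mapping; the category number encodes priority.
-- _KEYWORD_CATEGORY = {
--     'frontend': 0, 'front-end': 0, 'ui': 0, 'react': 0,
--     'backend': 1, 'back-end': 1, 'server': 1, 'api': 1,
--     'full stack': 2, 'fullstack': 2,
--     'devops': 3, 'sre': 3, 'infrastructure': 3,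
--     'data': 4, 'ml': 4, 'machine learning': 4, 'analyst': 4,
-- }
--
-- _SUFFIXES = [
--     ['Converted', 'Styled', 'Rendered', 'Integrated', 'Refactored',
--      'Tested', 'Improved', 'Enhanced', 'Modernized', 'Migrated'],
--     ['Deployed', 'Scaled', 'Containerised', 'Secured', 'Monitored',
--      'Provisioned', 'Configured', 'Maintained', 'Troubleshot', 'Resolved'],
--     ['Engineered', 'Deployed', 'Integrated', 'Tested', 'Debugged',
--      'Refactored', 'Maintained', 'Scaled', 'Secured', 'Mentored'],
--     ['Provisioned', 'Containerised', 'Orchestrated', 'Monitored',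
--      'Automated', 'Configured', 'Secured', 'Scaled', 'Troubleshot'],
--     ['Analyzed', 'Modeled', 'Trained', 'Evaluated', 'Visualized',
--      'Extracted', 'Transformed', 'Predicted', 'Clustered', 'Classified'],
--     ['Engineered', 'Maintained', 'Tested', 'Deployed', 'Integrated',
--      'Resolved', 'Refactored', 'Scaled', 'Documented', 'Mentored'],
-- ]
--
--
-- def _get_action_verbs_for_role(job_title: str) -> List[str]:
--     """Return role-appropriate action verbs for CV bullet points"""
--     title_lower = job_title.lower()
--     # exhaustively collect the categories of all matching keywords;
--     # the smallest category number wins (default: the last suffix).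
--     cat = min((c for w, c in _KEYWORD_CATEGORY.items() if w in title_lower),
--               default=len(_SUFFIXES) - 1)
--     return _COMMON_VERBS + _SUFFIXES[cat]
-- ===== Notes on version B (the rewrite author's own statement) =====
-- stated objective: alternative
-- what changed: Replaces the ordered if/elif first-match chain by an exhaustive scan over one flat keyword-to-category map, picking the suffix by the minimum matched category number (default = last): selection by min over a flat index map instead of short-circuit control flow.
import Mathlib
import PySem

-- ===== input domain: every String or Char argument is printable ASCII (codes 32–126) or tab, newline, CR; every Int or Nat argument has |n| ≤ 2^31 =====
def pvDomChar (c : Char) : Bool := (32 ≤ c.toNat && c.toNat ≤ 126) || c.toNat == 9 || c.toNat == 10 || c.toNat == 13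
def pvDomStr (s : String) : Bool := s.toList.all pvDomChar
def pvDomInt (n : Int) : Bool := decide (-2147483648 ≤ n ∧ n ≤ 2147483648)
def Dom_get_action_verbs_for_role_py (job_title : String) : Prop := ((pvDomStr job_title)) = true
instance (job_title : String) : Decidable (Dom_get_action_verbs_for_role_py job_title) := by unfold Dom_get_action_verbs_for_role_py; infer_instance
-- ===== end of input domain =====

-- B replaces A's ordered elif chain by an exhaustive scan of one flat keyword→category map,
-- selecting the suffix by the minimum matched category number (alternative decomposition, same cost).

-- ===== PORT A =====
def get_action_verbs_for_role_py (job_title : String) : List String :=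
  let title_lower := PySem.Str.lower job_title
  let common_verbs := ["Developed", "Designed", "Implemented", "Optimized", "Delivered",
    "Collaborated", "Built", "Led", "Architected", "Automated"]
  if ["frontend", "front-end", "ui", "react"].any (fun w => PySem.Str.isIn w title_lower) then
    common_verbs ++ ["Converted", "Styled", "Rendered", "Integrated", "Refactored",
      "Tested", "Improved", "Enhanced", "Modernized", "Migrated"]
  else if ["backend", "back-end", "server", "api"].any (fun w => PySem.Str.isIn w title_lower) then
    common_verbs ++ ["Deployed", "Scaled", "Containerised", "Secured", "Monitored",
      "Provisioned", "Configured", "Maintained", "Troubleshot", "Resolved"]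
  else if ["full stack", "fullstack"].any (fun w => PySem.Str.isIn w title_lower) then
    common_verbs ++ ["Engineered", "Deployed", "Integrated", "Tested", "Debugged",
      "Refactored", "Maintained", "Scaled", "Secured", "Mentored"]
  else if ["devops", "sre", "infrastructure"].any (fun w => PySem.Str.isIn w title_lower) then
    common_verbs ++ ["Provisioned", "Containerised", "Orchestrated", "Monitored",
      "Automated", "Configured", "Secured", "Scaled", "Troubleshot"]
  else if ["data", "ml", "machine learning", "analyst"].any (fun w => PySem.Str.isIn w title_lower) then
    common_verbs ++ ["Analyzed", "Modeled", "Trained", "Evaluated", "Visualized",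
      "Extracted", "Transformed", "Predicted", "Clustered", "Classified"]
  else
    common_verbs ++ ["Engineered", "Maintained", "Tested", "Deployed", "Integrated",
      "Resolved", "Refactored", "Scaled", "Documented", "Mentored"]

-- ===== PORT B =====
def pvCommonVerbs : List String :=
  ["Developed", "Designed", "Implemented", "Optimized", "Delivered",
   "Collaborated", "Built", "Led", "Architected", "Automated"]

-- flat keyword → category mapping, in Source B's dict insertion order
def pvKeywordCategory : List (String × Nat) :=
  [("frontend", 0), ("front-end", 0), ("ui", 0), ("react", 0),
   ("backend", 1), ("back-end", 1), ("server", 1), ("api", 1),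
   ("full stack", 2), ("fullstack", 2),
   ("devops", 3), ("sre", 3), ("infrastructure", 3),
   ("data", 4), ("ml", 4), ("machine learning", 4), ("analyst", 4)]

def pvSuffixes : List (List String) :=
  [["Converted", "Styled", "Rendered", "Integrated", "Refactored",
    "Tested", "Improved", "Enhanced", "Modernized", "Migrated"],
   ["Deployed", "Scaled", "Containerised", "Secured", "Monitored",
    "Provisioned", "Configured", "Maintained", "Troubleshot", "Resolved"],
   ["Engineered", "Deployed", "Integrated", "Tested", "Debugged",
    "Refactored", "Maintained", "Scaled", "Secured", "Mentored"],
   ["Provisioned", "Containerised", "Orchestrated", "Monitored",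
    "Automated", "Configured", "Secured", "Scaled", "Troubleshot"],
   ["Analyzed", "Modeled", "Trained", "Evaluated", "Visualized",
    "Extracted", "Transformed", "Predicted", "Clustered", "Classified"],
   ["Engineered", "Maintained", "Tested", "Deployed", "Integrated",
    "Resolved", "Refactored", "Scaled", "Documented", "Mentored"]]

-- min over the categories of all matching keywords; the accumulator starts at the
-- default 5 (= len(_SUFFIXES)-1), which is the exact value of Source B's
-- min(generator, default=5) since every category in the map is < 5.
def pvMinCat (t : String) : List (String × Nat) → Nat → Nat
  | [], acc => acc
  | (w, c) :: rest, acc =>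
      pvMinCat t rest (if PySem.Str.isIn w t then min acc c else acc)

def get_action_verbs_for_role_py_alt (job_title : String) : List String :=
  let title_lower := PySem.Str.lower job_title
  let cat := pvMinCat title_lower pvKeywordCategory 5
  pvCommonVerbs ++ pvSuffixes.getD cat []

-- ===== PRECONDITION & SPEC =====
def Spec_get_action_verbs_for_role_py (job_title : String) (out : List String) : Prop := out = get_action_verbs_for_role_py_alt job_title
instance (job_title : String) (out : List String) : Decidable (Spec_get_action_verbs_for_role_py job_title out) := by unfold Spec_get_action_verbs_for_role_py; infer_instance

-- ===== CLAIM (what is proved, stated in full; the proofs are below) =====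
def Claim_equal_get_action_verbs_for_role_py : Prop := ∀ (job_title : String), Dom_get_action_verbs_for_role_py job_title → Spec_get_action_verbs_for_role_py job_title (get_action_verbs_for_role_py job_title)

-- ===== LEMMAS AND PROOFS =====

-- folding one group of keywords that all carry the same category c
theorem pvMinCat_group (t : String) (c : Nat) :
    ∀ (ws : List String) (rest : List (String × Nat)) (acc : Nat),
      pvMinCat t (ws.map (fun w => (w, c)) ++ rest) acc
        = pvMinCat t rest (if ws.any (fun w => PySem.Str.isIn w t) then min acc c else acc) := by
  intro ws
  induction ws with
  | nil => intro rest acc; simp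
  | cons w ws ih =>
      intro rest acc
      simp only [List.map_cons, List.cons_append, pvMinCat, List.any_cons]
      rw [ih]
      congr 1
      rcases Bool.eq_false_or_eq_true (PySem.Str.isIn w t) with h | h <;>
        rcases Bool.eq_false_or_eq_true (ws.any fun w => PySem.Str.isIn w t) with h2 | h2 <;>
          simp only [h, h2, Bool.true_or, Bool.false_or] <;> simp

theorem pv_eq (jt : String) :
    get_action_verbs_for_role_py jt = get_action_verbs_for_role_py_alt jt := by
  simp only [get_action_verbs_for_role_py, get_action_verbs_for_role_py_alt]
  rw [show pvKeywordCategory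
        = (["frontend", "front-end", "ui", "react"].map (fun w => (w, 0)))
          ++ ((["backend", "back-end", "server", "api"].map (fun w => (w, 1)))
          ++ ((["full stack", "fullstack"].map (fun w => (w, 2)))
          ++ ((["devops", "sre", "infrastructure"].map (fun w => (w, 3)))
          ++ ((["data", "ml", "machine learning", "analyst"].map (fun w => (w, 4)))
          ++ ([] : List (String × Nat)))))) from rfl]
  rw [pvMinCat_group, pvMinCat_group, pvMinCat_group, pvMinCat_group, pvMinCat_group]
  set t := PySem.Str.lower jt
  cases h0 : (["frontend", "front-end", "ui", "react"].any (fun w => PySem.Str.isIn w t)) <;>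
  cases h1 : (["backend", "back-end", "server", "api"].any (fun w => PySem.Str.isIn w t)) <;>
  cases h2 : (["full stack", "fullstack"].any (fun w => PySem.Str.isIn w t)) <;>
  cases h3 : (["devops", "sre", "infrastructure"].any (fun w => PySem.Str.isIn w t)) <;>
  cases h4 : (["data", "ml", "machine learning", "analyst"].any (fun w => PySem.Str.isIn w t)) <;>
  rfl

-- ===== VERDICT (by name: the statement is the Claim_ definition above) =====
theorem get_action_verbs_for_role_py_spec : Claim_equal_get_action_verbs_for_role_py := by
  intro jt _
  exact pv_eq jt
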